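-- pv_equiv track=rewrite | github.com/Alexander-Wong/MLaCTransformer | src/mlac_transformer/transform/transform.py | _find_row_positions
-- ===== SOURCE A (Python) =====
-- def _find_row_positions(selected: list, context: list) -> list:
--     """Return the index in context of each row in selected (sequential scan)."""
--     positions = []
--     search_start = 0
--     for sel in selected:
--         for i in range(search_start, len(context)):
--             if context[i] == sel:
--                 positions.append(i)
--                 search_start = i + 1
--                 break
--     return positions
-- ===== SOURCE B (Python) =====
-- def _find_row_positions(selected: list, context: list) -> list:
--     """Index context once (value -> sorted list of its positions); for each selected
--     row, binary-search that list for the first position at/after the moving cursor."""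
--     index = {}
--     for i, v in enumerate(context):
--         index.setdefault(v, []).append(i)
--
--     def first_at_least(ps, cursor):
--         lo, hi = 0, len(ps)
--         while lo < hi:
--             mid = (lo + hi) // 2
--             if ps[mid] < cursor:
--                 lo = mid + 1
--             else:
--                 hi = mid
--         return lo
--
--     positions = []
--     cursor = 0
--     for sel in selected:
--         ps = index.get(sel)
--         if ps:
--             k = first_at_least(ps, cursor)
--             if k < len(ps):
--                 p = ps[k]
--                 positions.append(p)
--                 cursor = p + 1
--     return positions
-- ===== Notes on version B (the rewrite author's own statement) =====
-- stated objective: faster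
-- what changed: B indexes context once (value -> sorted list of positions) and answers each selected row with a hand-written binary search for the first position at/after the moving cursor, instead of rescanning context linearly for every row.
import Mathlib
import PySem

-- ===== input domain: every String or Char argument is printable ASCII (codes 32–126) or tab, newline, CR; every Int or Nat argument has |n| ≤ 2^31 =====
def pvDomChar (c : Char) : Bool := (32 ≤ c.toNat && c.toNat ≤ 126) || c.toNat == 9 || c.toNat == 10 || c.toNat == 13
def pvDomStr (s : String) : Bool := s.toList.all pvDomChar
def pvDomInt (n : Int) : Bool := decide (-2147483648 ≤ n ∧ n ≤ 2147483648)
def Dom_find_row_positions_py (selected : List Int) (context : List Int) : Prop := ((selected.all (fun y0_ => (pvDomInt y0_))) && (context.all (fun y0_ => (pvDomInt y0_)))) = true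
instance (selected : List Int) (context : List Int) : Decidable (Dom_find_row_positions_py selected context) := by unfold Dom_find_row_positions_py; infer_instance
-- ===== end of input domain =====

-- B replaces A's per-row linear rescans of context by a one-pass index (value → sorted list of
-- its positions) queried with a hand-written binary search for the first position at/after the
-- moving cursor (objective: faster; measured on generated inputs).

-- ===== PORT A =====
-- inner loop `for i in range(search_start, len(context)): if context[i] == sel: … break`;
-- `context[i]` is `pyGet?`; every i produced by the range is in bounds, so the `some` branch is exact.
def pvAScan (context : List Int) (sel : Int) : List Int → Option Int
  | [] => none
  | i :: rest =>
    if PySem.List.pyGet? context i = some sel then some i else pvAScan context sel rest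

def find_row_positions_py (selected : List Int) (context : List Int) : List Int :=
  (selected.foldl
    (fun (st : List Int × Int) sel =>
      match pvAScan context sel (PySem.List.pyRange st.2 (context.length : Int) 1) with
      | some i => (st.1 ++ [i], i + 1)
      | none => st)
    ([], 0)).1

-- ===== PORT B =====
-- `for i, v in enumerate(context): index.setdefault(v, []).append(i)`
def pvBIndex (context : List Int) : PySem.Dict Int (List Int) :=
  (PySem.List.enumerate context).foldl
    (fun d p => d.modify p.2 [] (· ++ [p.1])) PySem.Dict.empty

-- `first_at_least`: `while lo < hi: mid = (lo+hi)//2; …`; `ps[mid]` is always in bounds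
-- (0 ≤ lo ≤ mid < hi ≤ len(ps)), so `List.getD mid 0` is exact there.
def pvBisect (ps : List Int) (cursor : Int) (lo hi : Nat) : Nat :=
  if _h : lo < hi then
    let mid := (lo + hi) / 2
    if ps.getD mid 0 < cursor then pvBisect ps cursor (mid + 1) hi
    else pvBisect ps cursor lo mid
  else lo
termination_by hi - lo
decreasing_by all_goals omega

-- `ps = index.get(sel)` / `if ps:` (None or empty list both fail) / `k = first_at_least(ps, cursor)` /
-- `if k < len(ps): p = ps[k]; …`; `ps[k]` is in bounds under `k < len(ps)`, so `List.getD k 0` is exact.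
def find_row_positions_py_alt (selected : List Int) (context : List Int) : List Int :=
  let index := pvBIndex context
  (selected.foldl
    (fun (st : List Int × Int) sel =>
      match index.get? sel with
      | none => st
      | some ps =>
        if ps.isEmpty then st
        else
          let k := pvBisect ps st.2 0 ps.length
          if k < ps.length then (st.1 ++ [ps.getD k 0], ps.getD k 0 + 1) else st)
    ([], 0)).1

-- ===== PRECONDITION & SPEC =====
def Spec_find_row_positions_py (selected : List Int) (context : List Int) (out : List Int) : Prop := out = find_row_positions_py_alt selected context
instance (selected : List Int) (context : List Int) (out : List Int) : Decidable (Spec_find_row_positions_py selected context out) := by unfold Spec_find_row_positions_py; infer_instance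

-- ===== CLAIM (what is proved, stated in full; the proofs are below) =====
def Claim_equal_find_row_positions_py : Prop := ∀ (selected : List Int) (context : List Int), Dom_find_row_positions_py selected context → Spec_find_row_positions_py selected context (find_row_positions_py selected context)

-- ===== LEMMAS AND PROOFS =====

-- canonical list of the positions of `sel` in `ctx`, offset by `k`
def pvPos (sel k : Int) : List Int → List Int
  | [] => []
  | v :: rest => if v = sel then k :: pvPos sel (k + 1) rest else pvPos sel (k + 1) rest

-- first element of `l` that is ≥ c (proof-side spec of both A's scan and B's binary search)
def pvBFind (c : Int) : List Int → Option Int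
  | [] => none
  | p :: rest => if p ≥ c then some p else pvBFind c rest

theorem pvPos_filter (sel : Int) (ctx : List Int) : ∀ k : Int,
    ((((PySem.List.enumerate ctx k).map Prod.swap).filter (fun p => p.1 == sel)).map (·.2))
      = pvPos sel k ctx := by
  induction ctx with
  | nil => intro k; simp [pvPos, PySem.List.enumerate_nil]
  | cons v rest ih =>
    intro k
    simp only [PySem.List.enumerate_cons, List.map_cons, List.filter_cons, pvPos]
    by_cases h : v = sel
    · simp [h, ih]
    · simp [h, ih]

theorem pvBIndex_getD (ctx : List Int) (sel : Int) :
    (pvBIndex ctx).getD sel [] = pvPos sel 0 ctx := by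
  have h : pvBIndex ctx
      = ((PySem.List.enumerate ctx).map Prod.swap).foldl
          (fun d p => d.modify p.1 [] (· ++ [p.2])) PySem.Dict.empty := by
    simp [pvBIndex, List.foldl_map, Prod.swap]
  rw [h, PySem.Dict.getD_foldl_modify_append, ← pvPos_filter sel ctx 0]
  simp [PySem.Dict.getD_empty]

theorem pvPos_bounds (sel : Int) (ctx : List Int) : ∀ k j : Int,
    j ∈ pvPos sel k ctx → k ≤ j ∧ j < k + ctx.length := by
  induction ctx with
  | nil => intro k j h; simp [pvPos] at h
  | cons v rest ih =>
    intro k j h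
    simp only [pvPos] at h
    simp only [List.length_cons]
    by_cases hv : v = sel
    · rw [if_pos hv] at h
      rcases List.mem_cons.mp h with h | h
      · subst h; push_cast; omega
      · have := ih (k + 1) j h; push_cast; push_cast at this; omega
    · rw [if_neg hv] at h
      have := ih (k + 1) j h; push_cast; push_cast at this; omega

theorem pvPos_pairwise (sel : Int) (ctx : List Int) : ∀ k : Int,
    (pvPos sel k ctx).Pairwise (· < ·) := by
  induction ctx with
  | nil => intro k; simp [pvPos]
  | cons v rest ih =>
    intro k
    simp only [pvPos]
    by_cases hv : v = sel
    · rw [if_pos hv]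
      refine List.Pairwise.cons ?_ (ih (k + 1))
      intro j hj
      have := pvPos_bounds sel rest (k + 1) j hj
      omega
    · rw [if_neg hv]; exact ih (k + 1)

theorem pvPos_mem_iff (sel : Int) (ctx : List Int) : ∀ (k j : Int),
    (j ∈ pvPos sel k ctx ↔ ∃ n : Nat, j = k + n ∧ ctx[n]? = some sel) := by
  induction ctx with
  | nil => intro k j; simp [pvPos]
  | cons v rest ih =>
    intro k j
    simp only [pvPos]
    constructor
    · intro h
      by_cases hv : v = sel
      · rw [if_pos hv] at h
        rcases List.mem_cons.mp h with h | h
        · exact ⟨0, by omega, by simp [hv]⟩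
        · rcases (ih (k + 1) j).mp h with ⟨n, hn, hg⟩
          exact ⟨n + 1, by omega, by simpa using hg⟩
      · rw [if_neg hv] at h
        rcases (ih (k + 1) j).mp h with ⟨n, hn, hg⟩
        exact ⟨n + 1, by omega, by simpa using hg⟩
    · rintro ⟨n, hn, hg⟩
      cases n with
      | zero =>
        simp at hg
        rw [if_pos hg]
        exact List.mem_cons.mpr (Or.inl (by omega))
      | succ m =>
        simp at hg
        have hm : j ∈ pvPos sel (k + 1) rest :=
          (ih (k + 1) j).mpr ⟨m, by omega, hg⟩
        by_cases hv : v = sel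
        · rw [if_pos hv]; exact List.mem_cons.mpr (Or.inr hm)
        · rw [if_neg hv]; exact hm

theorem pvBFind_none (c : Int) : ∀ l : List Int, (∀ j ∈ l, j < c) → pvBFind c l = none := by
  intro l
  induction l with
  | nil => intro _; simp [pvBFind]
  | cons p rest ih =>
    intro h
    have hp := h p (by simp)
    simp only [pvBFind]
    rw [if_neg (by omega)]
    exact ih (fun j hj => h j (by simp [hj]))

theorem pvBFind_step (c : Int) : ∀ l : List Int, l.Pairwise (· < ·) →
    pvBFind c l = if c ∈ l then some c else pvBFind (c + 1) l := by
  intro l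
  induction l with
  | nil => intro _; simp [pvBFind]
  | cons p rest ih =>
    intro hpw
    have hrest := hpw.of_cons
    have hlt : ∀ j ∈ rest, p < j := fun j hj => List.rel_of_pairwise_cons hpw hj
    simp only [pvBFind]
    rcases lt_trichotomy c p with hcp | hcp | hcp
    · have hnot : c ∉ p :: rest := by
        intro hmem
        rcases List.mem_cons.mp hmem with h | h
        · omega
        · have := hlt c h; omega
      rw [if_pos (by omega : p ≥ c), if_neg hnot, if_pos (by omega : p ≥ c + 1)]
    · subst hcp
      rw [if_pos (le_refl c), if_pos (List.mem_cons_self ..)]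
    · rw [if_neg (by omega : ¬ p ≥ c), if_neg (by omega : ¬ p ≥ c + 1), ih hrest]
      by_cases hcr : c ∈ rest
      · rw [if_pos hcr, if_pos (List.mem_cons_of_mem _ hcr)]
      · rw [if_neg hcr, if_neg (by
          intro hmem
          rcases List.mem_cons.mp hmem with h | h
          · omega
          · exact hcr h)]

theorem pvBFind_mem (c : Int) : ∀ (l : List Int) (p : Int), pvBFind c l = some p → p ∈ l := by
  intro l
  induction l with
  | nil => intro p h; simp [pvBFind] at h
  | cons q rest ih =>
    intro p h
    simp only [pvBFind] at h
    by_cases hq : q ≥ c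
    · rw [if_pos hq] at h; simp at h; simp [h]
    · rw [if_neg hq] at h; simp [ih p h]

-- A's sequential scan from `start` finds exactly the first position ≥ start of `sel`'s positions.
theorem pvScan_eq_fuel (ctx : List Int) (sel : Int) : ∀ (fuel : Nat) (start : Int),
    0 ≤ start → (ctx.length : Int) - start ≤ fuel →
    pvAScan ctx sel (PySem.List.pyRange start (ctx.length : Int) 1)
      = pvBFind start (pvPos sel 0 ctx) := by
  intro fuel
  induction fuel with
  | zero =>
    intro start h0 hf
    rw [PySem.List.pyRange_one_eq_nil (by omega)]
    simp only [pvAScan]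
    symm
    apply pvBFind_none
    intro j hj
    have := pvPos_bounds sel ctx 0 j hj
    omega
  | succ f ih =>
    intro start h0 hf
    by_cases hlt : start < (ctx.length : Int)
    · rw [PySem.List.pyRange_one_cons hlt]
      simp only [pvAScan]
      rw [pvBFind_step start _ (pvPos_pairwise sel ctx 0)]
      by_cases hhit : PySem.List.pyGet? ctx start = some sel
      · rw [if_pos hhit]
        have hmem : start ∈ pvPos sel 0 ctx := by
          refine (pvPos_mem_iff sel ctx 0 start).mpr ⟨start.toNat, by omega, ?_⟩
          rw [← hhit]
          have : start = ((start.toNat : Nat) : Int) := by omega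
          rw [this, PySem.List.pyGet?_natCast]
          congr 1
        rw [if_pos hmem]
      · rw [if_neg hhit]
        have hnmem : ¬ start ∈ pvPos sel 0 ctx := by
          intro hmem
          rcases (pvPos_mem_iff sel ctx 0 start).mp hmem with ⟨n, hn, hg⟩
          apply hhit
          have hs : start = ((n : Nat) : Int) := by omega
          rw [hs, PySem.List.pyGet?_natCast]
          exact hg
        rw [if_neg hnmem]
        exact ih (start + 1) (by omega) (by omega)
    · rw [PySem.List.pyRange_one_eq_nil (by omega)]
      simp only [pvAScan]
      symm
      apply pvBFind_none
      intro j hj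
      have := pvPos_bounds sel ctx 0 j hj
      omega

theorem pvScan_eq (ctx : List Int) (sel start : Int) (h0 : 0 ≤ start) :
    pvAScan ctx sel (PySem.List.pyRange start (ctx.length : Int) 1)
      = pvBFind start (pvPos sel 0 ctx) := by
  exact pvScan_eq_fuel ctx sel ((ctx.length : Int) - start).toNat start h0 (by omega)

-- B's binary search splits a sorted list at the first element ≥ cursor.
theorem pvBisect_spec (ps : List Int) (cursor : Int) (hsort : ps.Pairwise (· < ·)) :
    ∀ (d lo hi : Nat), hi - lo ≤ d → hi ≤ ps.length → lo ≤ hi →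
    (∀ i, i < lo → ps.getD i 0 < cursor) →
    (∀ i, hi ≤ i → i < ps.length → cursor ≤ ps.getD i 0) →
    (∀ i, i < pvBisect ps cursor lo hi → ps.getD i 0 < cursor) ∧
    (∀ i, pvBisect ps cursor lo hi ≤ i → i < ps.length → cursor ≤ ps.getD i 0) ∧
    pvBisect ps cursor lo hi ≤ ps.length := by
  have hmono : ∀ (i j : Nat), i < j → j < ps.length → ps.getD i 0 < ps.getD j 0 := by
    intro i j hij hj
    have hi : i < ps.length := by omega
    rw [List.getD_eq_getElem ps 0 hi, List.getD_eq_getElem ps 0 hj]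
    exact List.pairwise_iff_getElem.mp hsort i j hi hj hij
  intro d
  induction d with
  | zero =>
    intro lo hi hd hlen hle hlow hhigh
    have : lo = hi := by omega
    rw [pvBisect, dif_neg (by omega)]
    exact ⟨hlow, by subst this; exact hhigh, by omega⟩
  | succ f ih =>
    intro lo hi hd hlen hle hlow hhigh
    by_cases hlt : lo < hi
    · rw [pvBisect, dif_pos hlt]
      simp only
      by_cases hc : ps.getD ((lo + hi) / 2) 0 < cursor
      · rw [if_pos hc]
        refine ih ((lo + hi) / 2 + 1) hi (by omega) hlen (by omega) ?_ hhigh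
        intro i hi2
        by_cases hil : i < lo
        · exact hlow i hil
        · by_cases him : i = (lo + hi) / 2
          · rw [him]; exact hc
          · exact lt_trans (hmono i ((lo + hi) / 2) (by omega) (by omega)) hc
      · rw [if_neg hc]
        refine ih lo ((lo + hi) / 2) (by omega) (by omega) (by omega) hlow ?_
        intro i hi2 hi3
        by_cases him : i = (lo + hi) / 2
        · rw [him]; omega
        · exact le_trans (by omega) (le_of_lt (hmono ((lo + hi) / 2) i (by omega) hi3))
    · rw [pvBisect, dif_neg hlt]
      have : lo = hi := by omega
      exact ⟨hlow, by subst this; exact hhigh, by omega⟩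

-- any split point at the first element ≥ c names exactly pvBFind's answer
theorem pvBFind_of_split (c : Int) : ∀ (ps : List Int) (k : Nat),
    k ≤ ps.length →
    (∀ i, i < k → ps.getD i 0 < c) →
    (∀ i, k ≤ i → i < ps.length → c ≤ ps.getD i 0) →
    pvBFind c ps = if k < ps.length then some (ps.getD k 0) else none := by
  intro ps
  induction ps with
  | nil =>
    intro k hk _ _
    simp [pvBFind]
  | cons p rest ih =>
    intro k hk hlow hhigh
    cases k with
    | zero =>
      have hp : c ≤ p := by simpa using hhigh 0 (by omega) (by simp)
      simp only [pvBFind]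
      rw [if_pos (by omega)]
      simp
    | succ k' =>
      have hp : p < c := by simpa using hlow 0 (by omega)
      simp only [pvBFind]
      rw [if_neg (by omega)]
      have := ih k' (by simpa using hk)
        (fun i hi => by simpa using hlow (i + 1) (by omega))
        (fun i hi1 hi2 => by simpa using hhigh (i + 1) (by omega) (by simpa using hi2))
      rw [this]
      simp only [List.length_cons, List.getD_cons_succ]
      by_cases h : k' < rest.length
      · rw [if_pos h, if_pos (by omega)]
      · rw [if_neg h, if_neg (by omega)]

-- the result of B's per-row lookup, as an Option (proof-side view of B's step)
def pvBOpt (ctx : List Int) (sel cursor : Int) : Option Int :=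
  match (pvBIndex ctx).get? sel with
  | none => none
  | some ps =>
    if ps.isEmpty then none
    else
      let k := pvBisect ps cursor 0 ps.length
      if k < ps.length then some (ps.getD k 0) else none

theorem pvBOpt_eq_pvBFind (ctx : List Int) (sel cursor : Int) :
    pvBOpt ctx sel cursor = pvBFind cursor (pvPos sel 0 ctx) := by
  unfold pvBOpt
  cases hget : (pvBIndex ctx).get? sel with
  | none =>
    have h0 : pvPos sel 0 ctx = [] := by
      rw [← pvBIndex_getD, PySem.Dict.getD_eq_get?_getD, hget]; rfl
    rw [h0]
    simp [pvBFind]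
  | some ps =>
    have hps : ps = pvPos sel 0 ctx := by
      rw [← pvBIndex_getD, PySem.Dict.getD_eq_get?_getD, hget]; rfl
    dsimp only
    by_cases hemp : ps.isEmpty
    · rw [if_pos hemp]
      rw [← hps, List.isEmpty_iff.mp hemp]
      simp [pvBFind]
    · rw [if_neg hemp]
      have hsort : ps.Pairwise (· < ·) := hps ▸ pvPos_pairwise sel ctx 0
      obtain ⟨hlow, hhigh, hlen⟩ := pvBisect_spec ps cursor hsort ps.length 0 ps.length
        (by omega) (le_refl _) (by omega) (by omega) (fun i h1 h2 => by omega)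
      rw [← hps, pvBFind_of_split cursor ps (pvBisect ps cursor 0 ps.length) hlen hlow hhigh]

-- B's foldl step rewritten through pvBOpt
theorem pvBStep_eq (ctx : List Int) (sel : Int) (st : List Int × Int) :
    (match (pvBIndex ctx).get? sel with
     | none => st
     | some ps =>
       if ps.isEmpty then st
       else
         let k := pvBisect ps st.2 0 ps.length
         if k < ps.length then (st.1 ++ [ps.getD k 0], ps.getD k 0 + 1) else st)
    = match pvBOpt ctx sel st.2 with
      | some p => (st.1 ++ [p], p + 1)
      | none => st := by
  unfold pvBOpt
  cases hget : (pvBIndex ctx).get? sel with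
  | none => rfl
  | some ps =>
    dsimp only
    by_cases hemp : ps.isEmpty
    · rw [if_pos hemp, if_pos hemp]
    · rw [if_neg hemp, if_neg hemp]
      by_cases hk : pvBisect ps st.2 0 ps.length < ps.length
      · rw [if_pos hk, if_pos hk]
      · rw [if_neg hk, if_neg hk]

theorem pvFold_eq (ctx : List Int) : ∀ (sel : List Int) (acc : List Int) (cursor : Int),
    0 ≤ cursor →
    (sel.foldl
      (fun (st : List Int × Int) s =>
        match pvAScan ctx s (PySem.List.pyRange st.2 (ctx.length : Int) 1) with
        | some i => (st.1 ++ [i], i + 1)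
        | none => st) (acc, cursor)).1
    = (sel.foldl
      (fun (st : List Int × Int) s =>
        match (pvBIndex ctx).get? s with
        | none => st
        | some ps =>
          if ps.isEmpty then st
          else
            let k := pvBisect ps st.2 0 ps.length
            if k < ps.length then (st.1 ++ [ps.getD k 0], ps.getD k 0 + 1) else st)
      (acc, cursor)).1 := by
  intro sel
  induction sel with
  | nil => intro acc cursor h; simp
  | cons s rest ih =>
    intro acc cursor h
    simp only [List.foldl_cons]
    rw [pvScan_eq ctx s cursor h, ← pvBOpt_eq_pvBFind, pvBStep_eq ctx s (acc, cursor)]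
    cases hfind : pvBOpt ctx s cursor with
    | none => exact ih acc cursor h
    | some p =>
      have hp : 0 ≤ p := by
        have hmem := pvBFind_mem cursor (pvPos s 0 ctx) p
          (by rw [← pvBOpt_eq_pvBFind]; exact hfind)
        have := pvPos_bounds s ctx 0 p hmem
        omega
      exact ih (acc ++ [p]) (p + 1) (by omega)

-- ===== VERDICT (by name: the statement is the Claim_ definition above) =====
theorem find_row_positions_py_spec : Claim_equal_find_row_positions_py := by
  intro selected context _
  unfold Spec_find_row_positions_py find_row_positions_py find_row_positions_py_alt
  exact pvFold_eq context selected [] 0 (by omega)
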